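-- pv_equiv track=rewrite | github.com/daisy/MathCAT | PythonScripts/fuzz_to_test.py | rust_string_literal
-- ===== SOURCE A (Python) =====
-- def rust_string_literal(text: str) -> str:
--     """Format a Python string as a Rust raw string literal r#"..."#.
--
--     Falls back to regular string with escapes if the content contains
--     both `"#` sequences at every nesting level (extremely unlikely for MathML).
--     """
--     # Find a raw-string delimiter that doesn't clash with the content.
--     for hashes in range(0, 10):
--         delim = "#" * hashes
--         closing = '"' + delim
--         if closing not in text:
--             return f'r{delim}"{text}"{delim}'
--     # Pathological fallback: use an escaped regular string.
--     escaped = text.replace("\\", "\\\\").replace('"', '\\"')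
--     return f'"{escaped}"'
-- ===== SOURCE B (Python) =====
-- def rust_string_literal(text: str) -> str:
--     """One pass: find the longest run of '#' immediately after any '"';
--     the smallest non-clashing delimiter has that run length + 1 hashes."""
--     m = -1
--     i = 0
--     n = len(text)
--     while i < n:
--         if text[i] == '"':
--             j = i + 1
--             while j < n and text[j] == '#':
--                 j += 1
--             run = j - i - 1
--             if run > m:
--                 m = run
--             i = j
--         else:
--             i += 1
--     k = m + 1
--     if k <= 9:
--         d = '#' * k
--         return 'r' + d + '"' + text + '"' + d
--     escaped = text.replace('\\', '\\\\').replace('"', '\\"')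
--     return '"' + escaped + '"'
-- ===== Notes on version B (the rewrite author's own statement) =====
-- stated objective: alternative
-- what changed: B computes the needed delimiter length directly by one left-to-right scan that tracks the longest run of '#' immediately following a '"', instead of A's loop that tries each of ten candidate delimiters with a fresh substring search.
import Mathlib
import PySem

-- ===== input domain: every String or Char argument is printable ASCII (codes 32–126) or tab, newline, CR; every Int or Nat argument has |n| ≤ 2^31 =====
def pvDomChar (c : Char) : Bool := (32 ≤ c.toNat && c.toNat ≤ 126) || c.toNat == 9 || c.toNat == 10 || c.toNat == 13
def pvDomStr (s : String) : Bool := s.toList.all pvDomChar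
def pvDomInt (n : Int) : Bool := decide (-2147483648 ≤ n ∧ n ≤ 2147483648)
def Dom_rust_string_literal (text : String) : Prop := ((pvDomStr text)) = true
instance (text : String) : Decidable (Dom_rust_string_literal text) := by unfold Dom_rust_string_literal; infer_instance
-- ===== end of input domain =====

-- B replaces A's ten substring searches by ONE left-to-right scan that measures the
-- longest '#'-run following a '"' (objective: alternative single-pass algorithm).

-- ===== PORT A =====
-- the escaped fallback, the identical last two lines of both Pythons
def rslFallback (l : List Char) : String :=
  String.ofList ('"' :: PySem.Chars.replace (PySem.Chars.replace l ['\\'] ['\\', '\\']) ['"'] ['\\', '"'] ++ ['"'])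

-- A's 'for hashes in range(0, 10)' loop, as recursion counting hashes upward
def rslA_go (l : List Char) (hashes : Nat) : String :=
  if hashes < 10 then
    let delim := List.replicate hashes '#'
    if PySem.Chars.isIn ('"' :: delim) l then rslA_go l (hashes + 1)
    else String.ofList ('r' :: delim ++ '"' :: l ++ '"' :: delim)
  else rslFallback l
termination_by 10 - hashes

def rust_string_literal (text : String) : String := rslA_go text.toList 0

-- ===== PORT B =====
-- B's scan: m = longest run of '#' immediately after a '"' (-1 if no '"');
-- the inner while loop counts the leading '#'-run (takeWhile) and jumps past it (drop)
def rslB_scan (m : Int) : List Char → Int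
  | [] => m
  | c :: cs =>
    if c = '"' then
      let run := (cs.takeWhile (fun d => d == '#')).length
      rslB_scan (max m run) (cs.drop run)
    else rslB_scan m cs
termination_by l => l.length
decreasing_by
  · simp only [List.length_drop, List.length_cons]; omega
  · simp

def rust_string_literal_alt (text : String) : String :=
  let m := rslB_scan (-1) text.toList
  if m + 1 ≤ 9 then
    let d := List.replicate (m + 1).toNat '#'
    String.ofList ('r' :: d ++ '"' :: text.toList ++ '"' :: d)
  else rslFallback text.toList

-- ===== PRECONDITION & SPEC =====
def Spec_rust_string_literal (text : String) (out : String) : Prop := out = rust_string_literal_alt text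
instance (text : String) (out : String) : Decidable (Spec_rust_string_literal text out) := by unfold Spec_rust_string_literal; infer_instance

-- ===== CLAIM (what is proved, stated in full; the proofs are below) =====
def Claim_equal_rust_string_literal : Prop := ∀ (text : String), Dom_rust_string_literal text → Spec_rust_string_literal text (rust_string_literal text)

-- ===== LEMMAS AND PROOFS =====

-- the accumulator of the scan is a running max (for accumulators ≥ -1, the only ones used)
theorem rslB_scan_acc (n : Nat) : ∀ (l : List Char), l.length ≤ n → ∀ m : Int, -1 ≤ m →
    rslB_scan m l = max m (rslB_scan (-1) l) := by
  induction n with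
  | zero =>
    intro l hl m hm
    have : l = [] := List.length_eq_zero_iff.mp (Nat.le_zero.mp hl)
    subst this; simp [rslB_scan]; omega
  | succ n ih =>
    intro l hl m hm
    match l with
    | [] => simp [rslB_scan]; omega
    | c :: cs =>
      by_cases hc : c = '"'
      · simp only [rslB_scan, if_pos hc]
        set r : Nat := (cs.takeWhile (fun d => d == '#')).length with hr
        have hlen : (cs.drop r).length ≤ n := by
          rw [List.length_drop]; simp at hl; omega
        rw [ih _ hlen (max m r) (by omega), ih _ hlen (max (-1) r) (by omega)]
        omega
      · simp only [rslB_scan, if_neg hc]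
        exact ih cs (by simp at hl; omega) m hm

theorem rslB_scan_ge (l : List Char) (m : Int) (hm : -1 ≤ m) : m ≤ rslB_scan m l := by
  rw [rslB_scan_acc l.length l le_rfl m hm]; omega

-- prefix of a '#'-replicate characterizes k ≤ leading-'#'-run length
theorem replicate_prefix_iff (l : List Char) : ∀ (k : Nat),
    (List.replicate k '#' <+: l ↔ k ≤ (l.takeWhile (fun d => d == '#')).length) := by
  induction l with
  | nil =>
    intro k
    cases k with
    | zero => simp
    | succ k => simp [List.replicate_succ]
  | cons c cs ih =>
    intro k
    cases k with
    | zero => simp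
    | succ k =>
      rw [List.replicate_succ, List.cons_prefix_cons]
      by_cases hc : c = '#'
      · subst hc; simp [ih k]
      · simp [hc]
        intro h; exact absurd h.symm hc

-- a pattern starting with '"' occurs in '#'-run ++ rest iff it occurs in rest
theorem infix_replicate_hash (q : List Char) (rest : List Char) : ∀ (r : Nat),
    (('"' :: q) <:+: (List.replicate r '#' ++ rest) ↔ ('"' :: q) <:+: rest) := by
  intro r
  induction r with
  | zero => simp
  | succ r ih =>
    rw [List.replicate_succ, List.cons_append, List.infix_cons_iff]
    constructor
    · rintro (hp | hi)
      · rw [List.cons_prefix_cons] at hp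
        exact absurd hp.1 (by decide)
      · exact ih.mp hi
    · intro h; exact Or.inr (ih.mpr h)

-- central characterization: the closing delimiter '"' + k·'#' occurs in l iff k ≤ scan result
theorem infix_iff_le_scan (n : Nat) : ∀ (l : List Char), l.length ≤ n → ∀ (k : Nat),
    (('"' :: List.replicate k '#') <:+: l ↔ (k : Int) ≤ rslB_scan (-1) l) := by
  induction n with
  | zero =>
    intro l hl k
    have : l = [] := List.length_eq_zero_iff.mp (Nat.le_zero.mp hl)
    subst this
    simp [rslB_scan]
    omega
  | succ n ih =>
    intro l hl k
    match l with
    | [] => simp [rslB_scan]; omega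
    | c :: cs =>
      rw [List.infix_cons_iff]
      by_cases hc : c = '"'
      · subst hc
        simp only [rslB_scan, if_true]
        have hlen2 : (cs.drop (cs.takeWhile (fun d => d == '#')).length).length ≤ n := by
          rw [List.length_drop]; simp at hl; omega
        set r : Nat := (cs.takeWhile (fun d => d == '#')).length with hr
        have hrep : cs.takeWhile (fun d => d == '#') = List.replicate r '#' := by
          rw [hr]
          exact List.eq_replicate_of_mem (fun x hx => by
            have := List.mem_takeWhile_imp hx; simpa using this)
        have hdrop : cs.drop r = cs.dropWhile (fun d => d == '#') := by
          have h := List.drop_left (l₁ := cs.takeWhile (fun d => d == '#'))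
            (l₂ := cs.dropWhile (fun d => d == '#'))
          rw [List.takeWhile_append_dropWhile] at h
          rw [hr]; exact h
        have hsplit : cs = List.replicate r '#' ++ cs.drop r := by
          rw [hdrop, ← hrep]
          exact (List.takeWhile_append_dropWhile).symm
        have hR : rslB_scan (max (-1) (r : Int)) (cs.drop r) =
            max (r : Int) (rslB_scan (-1) (cs.drop r)) := by
          rw [rslB_scan_acc (cs.drop r).length _ le_rfl _ (by omega)]
          omega
        have h1 : ('\"' :: List.replicate k '#') <+: ('\"' :: cs) ↔ k ≤ r := by
          rw [List.cons_prefix_cons]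
          simp [replicate_prefix_iff cs k, hr]
        have h2 : ('\"' :: List.replicate k '#') <:+: cs ↔
            (k : Int) ≤ rslB_scan (-1) (cs.drop r) := by
          conv_lhs => rw [hsplit]
          rw [infix_replicate_hash, ih _ hlen2 k]
        rw [h1, h2, hR]
        constructor
        · rintro (h | h) <;> omega
        · intro h
          by_cases hk : k ≤ r
          · exact Or.inl hk
          · exact Or.inr (by omega)
      · simp only [rslB_scan, if_neg hc]
        have hlen : cs.length ≤ n := by simp at hl; omega
        rw [← ih cs hlen k]
        constructor
        · rintro (hp | hi)
          · rw [List.cons_prefix_cons] at hp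
            exact absurd hp.1.symm hc
          · exact hi
        · exact Or.inr

theorem rslA_go_eq (n : Nat) : ∀ (l : List Char) (h : Nat), h + n = 10 →
    (h : Int) ≤ rslB_scan (-1) l + 1 →
    rslA_go l h =
      (if rslB_scan (-1) l + 1 ≤ 9 then
        String.ofList ('r' :: List.replicate (rslB_scan (-1) l + 1).toNat '#' ++ '"' :: l ++ '"' :: List.replicate (rslB_scan (-1) l + 1).toNat '#')
      else rslFallback l) := by
  induction n with
  | zero =>
    intro l h hsum hinv
    have h10 : h = 10 := by omega
    subst h10
    rw [rslA_go, if_neg (by omega), if_neg (by omega)]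
  | succ n ih =>
    intro l h hsum hinv
    have hlt : h < 10 := by omega
    rw [rslA_go, if_pos hlt]
    by_cases hc : (h : Int) ≤ rslB_scan (-1) l
    · rw [if_pos ((PySem.Chars.isIn_iff_infix _ _).mpr
        ((infix_iff_le_scan l.length l le_rfl h).mpr hc))]
      exact ih l (h + 1) (by omega) (by push_cast; omega)
    · rw [if_neg (by
        simp only [Bool.not_eq_true] at *
        rw [← Bool.not_eq_true, PySem.Chars.isIn_iff_infix]
        intro hin
        exact hc ((infix_iff_le_scan l.length l le_rfl h).mp hin))]
      have heq : rslB_scan (-1) l + 1 = (h : Int) := by omega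
      rw [heq, if_pos (by omega)]
      simp

-- ===== VERDICT (by name: the statement is the Claim_ definition above) =====
theorem rust_string_literal_spec : Claim_equal_rust_string_literal := by
  intro text _
  unfold Spec_rust_string_literal rust_string_literal rust_string_literal_alt
  have := rslB_scan_ge text.toList (-1) (by omega)
  rw [rslA_go_eq 10 text.toList 0 (by omega) (by omega)]
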